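-- pv_equiv track=rewrite | github.com/jaredlewiswechs/newton-suite | nina/tinytalk_py/education.py | _generate_accommodations
-- ===== SOURCE A (Python) =====
-- from typing import Any, Dict, List, Optional, Tuple
--
-- def _generate_accommodations(student_needs: Dict[str, List[str]]) -> Dict[str, List[str]]:
--     """Generate accommodations based on student needs."""
--     accommodations = {}
--
--     for need_type, students in student_needs.items():
--         if need_type == "ell":
--             accommodations["English Language Learners"] = [
--                 "Provide vocabulary word bank",
--                 "Allow use of native language dictionary",
--                 "Pair with bilingual peer buddy",
--                 f"Students: {', '.join(students)}"
--             ]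
--         elif need_type == "504":
--             accommodations["504 Accommodations"] = [
--                 "Extended time on assessments",
--                 "Preferential seating",
--                 "Check for understanding frequently",
--                 f"Students: {', '.join(students)}"
--             ]
--         elif need_type == "sped":
--             accommodations["Special Education"] = [
--                 "Reduce problem set quantity",
--                 "Provide graphic organizers",
--                 "Allow calculator use as specified in IEP",
--                 f"Students: {', '.join(students)}"
--             ]
--         elif need_type == "gt":
--             accommodations["Gifted & Talented"] = [
--                 "Provide enrichment problems",
--                 "Independent research extension",
--                 "Leadership role in group work",
--                 f"Students: {', '.join(students)}"
--             ]
--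
--     return accommodations
-- ===== SOURCE B (Python) =====
-- # B inverts the traversal: instead of scanning the students' needs and
-- # dispatching through an if/elif chain, it scans the four known categories,
-- # collects the ones present tagged with their position in the input order,
-- # then sorts by that position to restore the original insertion order.
--
-- _ROWS = [
--     ("ell", "English Language Learners", [
--         "Provide vocabulary word bank",
--         "Allow use of native language dictionary",
--         "Pair with bilingual peer buddy",
--     ]),
--     ("504", "504 Accommodations", [
--         "Extended time on assessments",
--         "Preferential seating",
--         "Check for understanding frequently",
--     ]),
--     ("sped", "Special Education", [
--         "Reduce problem set quantity",
--         "Provide graphic organizers",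
--         "Allow calculator use as specified in IEP",
--     ]),
--     ("gt", "Gifted & Talented", [
--         "Provide enrichment problems",
--         "Independent research extension",
--         "Leadership role in group work",
--     ]),
-- ]
--
--
-- def _generate_accommodations(student_needs):
--     """Generate accommodations based on student needs (category-first scan)."""
--     order = list(student_needs)
--     found = []
--     for need_type, title, base in _ROWS:
--         if need_type in student_needs:
--             found.append((order.index(need_type), title,
--                           base + ["Students: " + ", ".join(student_needs[need_type])]))
--     found.sort(key=lambda e: e[0])
--     return {title: lines for _, title, lines in found}
-- ===== Notes on version B (the rewrite author's own statement) =====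
-- stated objective: alternative
-- what changed: Inverts the traversal: instead of scanning student_needs and dispatching each key through an if/elif chain, B scans the fixed four-category table, collects the categories present in student_needs tagged with their position in the input key order, sorts by that position and emits the dict, restoring the original insertion order.
import Mathlib
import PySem

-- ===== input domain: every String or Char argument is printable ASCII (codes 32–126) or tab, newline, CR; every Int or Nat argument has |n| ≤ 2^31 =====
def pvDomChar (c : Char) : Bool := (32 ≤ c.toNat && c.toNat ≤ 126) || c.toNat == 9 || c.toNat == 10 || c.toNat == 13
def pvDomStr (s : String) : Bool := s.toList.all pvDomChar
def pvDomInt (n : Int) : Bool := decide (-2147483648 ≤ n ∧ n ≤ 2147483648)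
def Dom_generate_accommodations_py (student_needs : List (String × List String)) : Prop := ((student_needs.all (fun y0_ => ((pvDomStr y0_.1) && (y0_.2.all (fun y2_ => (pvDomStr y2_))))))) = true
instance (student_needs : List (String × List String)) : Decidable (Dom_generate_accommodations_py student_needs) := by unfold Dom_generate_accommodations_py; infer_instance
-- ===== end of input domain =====

-- ===== PORT A =====
-- B replaces A's scan-the-needs-and-dispatch if/elif chain by a scan of the four
-- fixed categories followed by a sort on input positions (objective: alternative).

-- f"Students: {', '.join(students)}"
def pvLine (students : List String) : String :=
  "Students: " ++ PySem.Str.join ", " students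

-- the body of A's for-loop (the if/elif chain), acting on the accommodations dict
def pvStepA (acc : PySem.Dict String (List String)) (kv : String × List String) :
    PySem.Dict String (List String) :=
  if kv.1 == "ell" then
    acc.insert "English Language Learners"
      ["Provide vocabulary word bank",
       "Allow use of native language dictionary",
       "Pair with bilingual peer buddy",
       pvLine kv.2]
  else if kv.1 == "504" then
    acc.insert "504 Accommodations"
      ["Extended time on assessments",
       "Preferential seating",
       "Check for understanding frequently",
       pvLine kv.2]
  else if kv.1 == "sped" then
    acc.insert "Special Education"
      ["Reduce problem set quantity",
       "Provide graphic organizers",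
       "Allow calculator use as specified in IEP",
       pvLine kv.2]
  else if kv.1 == "gt" then
    acc.insert "Gifted & Talented"
      ["Provide enrichment problems",
       "Independent research extension",
       "Leadership role in group work",
       pvLine kv.2]
  else acc

def generate_accommodations_py (student_needs : List (String × List String)) : List (String × List String) :=
  (student_needs.foldl pvStepA PySem.Dict.empty).items

-- ===== PORT B =====
-- the static _ROWS table of Source B: (need_type, title, base accommodations)
def pvRowsB : List (String × String × List String) :=
  [("ell", "English Language Learners",
     ["Provide vocabulary word bank",
      "Allow use of native language dictionary",
      "Pair with bilingual peer buddy"]),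
   ("504", "504 Accommodations",
     ["Extended time on assessments",
      "Preferential seating",
      "Check for understanding frequently"]),
   ("sped", "Special Education",
     ["Reduce problem set quantity",
      "Provide graphic organizers",
      "Allow calculator use as specified in IEP"]),
   ("gt", "Gifted & Talented",
     ["Provide enrichment problems",
      "Independent research extension",
      "Leadership role in group work"])]

def generate_accommodations_py_alt (student_needs : List (String × List String)) : List (String × List String) :=
  -- the Python caller holds a dict; Dict.ofList is that dict built from the pairs
  let d := PySem.Dict.ofList student_needs
  -- order = list(student_needs)
  let order := d.keys
  -- for need_type, title, base in _ROWS: if need_type in student_needs: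
  --   found.append((order.index(need_type), title, base + [f"Students: ..."]))
  -- (order.index(...) and student_needs[...] sit behind the membership test,
  --  so index? is some and the key is present; the .getD defaults are never used)
  let found := pvRowsB.foldl (fun acc r =>
    if d.contains r.1 then
      acc ++ [((PySem.List.index? order r.1).getD 0, r.2.1, r.2.2 ++ [pvLine (d.getD r.1 [])])]
    else acc) ([] : List (Nat × String × List String))
  -- found.sort(key=lambda e: e[0]); {title: lines for _, title, lines in found}
  (PySem.List.sorted found (fun e => e.1)).map (fun e => (e.2.1, e.2.2))

-- ===== PRECONDITION & SPEC =====
def Spec_generate_accommodations_py (student_needs : List (String × List String)) (out : List (String × List String)) : Prop := out = generate_accommodations_py_alt student_needs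
instance (student_needs : List (String × List String)) (out : List (String × List String)) : Decidable (Spec_generate_accommodations_py student_needs out) := by unfold Spec_generate_accommodations_py; infer_instance

-- ===== CLAIM (what is proved, stated in full; the proofs are below) =====
def Claim_equal_generate_accommodations_py : Prop := ∀ (student_needs : List (String × List String)), Dom_generate_accommodations_py student_needs → Spec_generate_accommodations_py student_needs (generate_accommodations_py student_needs)

-- ===== LEMMAS AND PROOFS =====

-- proof-side helpers
-- the (title, base) row for a key, if any
def pvRowOf? (k : String) : Option (String × List String) :=
  (pvRowsB.find? (fun r => r.1 == k)).map (fun r => r.2)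

-- the accommodation entry a key/value pair contributes, if any
def pvEntry? (k : String) (v : List String) : Option (String × List String) :=
  (pvRowOf? k).map (fun tb => (tb.1, tb.2 ++ [pvLine v]))

-- the element B's loop appends for a present row
def pvG (d : PySem.Dict String (List String)) (r : String × String × List String) :
    Nat × String × List String :=
  ((PySem.List.index? d.keys r.1).getD 0, r.2.1, r.2.2 ++ [pvLine (d.getD r.1 [])])

-- B's found-list re-ordered by key position (the result of the sort)
def pvT (d : PySem.Dict String (List String)) : List (Nat × String × List String) :=
  d.keys.zipIdx.filterMap
    (fun p => (pvRowOf? p.1).map (fun tb => (p.2, tb.1, tb.2 ++ [pvLine (d.getD p.1 [])])))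

theorem pvRowsB_nodup : pvRowsB.Nodup := by decide

theorem pvRowsB_key_inj : ∀ r ∈ pvRowsB, ∀ r' ∈ pvRowsB, r.1 = r'.1 → r = r' := by decide

theorem pvRowsB_title_inj : ∀ r ∈ pvRowsB, ∀ r' ∈ pvRowsB, r.2.1 = r'.2.1 → r = r' := by decide

theorem pvRowOf?_of_mem : ∀ r ∈ pvRowsB, pvRowOf? r.1 = some r.2 := by decide

theorem pvRowOf?_some_exists {k : String} {tb : String × List String}
    (h : pvRowOf? k = some tb) : ∃ r ∈ pvRowsB, r.1 = k ∧ r.2 = tb := by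
  unfold pvRowOf? at h
  cases hf : pvRowsB.find? (fun r => r.1 == k) with
  | none => rw [hf] at h; simp at h
  | some r =>
    rw [hf] at h
    simp only [Option.map_some, Option.some.injEq] at h
    exact ⟨r, List.mem_of_find?_eq_some hf, by simpa using List.find?_some hf, h⟩

theorem pvTitle_inj {a b : String} {tb tb' : String × List String}
    (ha : pvRowOf? a = some tb) (hb : pvRowOf? b = some tb') (ht : tb.1 = tb'.1) : a = b := by
  obtain ⟨r, hr, hrk, hrv⟩ := pvRowOf?_some_exists ha
  obtain ⟨r', hr', hrk', hrv'⟩ := pvRowOf?_some_exists hb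
  have : r = r' := pvRowsB_title_inj r hr r' hr' (by rw [hrv, hrv']; exact ht)
  rw [← hrk, ← hrk', this]

-- A's loop body in terms of pvEntry?
theorem pvStepA_eq (acc : PySem.Dict String (List String)) (k : String) (s : List String) :
    pvStepA acc (k, s) = match pvEntry? k s with
      | some tl => acc.insert tl.1 tl.2
      | none => acc := by
  by_cases h1 : k = "ell"
  · subst h1; simp [pvStepA, pvEntry?, pvRowOf?, pvRowsB]
  by_cases h2 : k = "504"
  · subst h2; simp [pvStepA, pvEntry?, pvRowOf?, pvRowsB]
  by_cases h3 : k = "sped"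
  · subst h3; simp [pvStepA, pvEntry?, pvRowOf?, pvRowsB]
  by_cases h4 : k = "gt"
  · subst h4; simp [pvStepA, pvEntry?, pvRowOf?, pvRowsB]
  · simp [pvStepA, pvEntry?, pvRowOf?, pvRowsB,
      h1, h2, h3, h4, Ne.symm h1, Ne.symm h2, Ne.symm h3, Ne.symm h4]

theorem pvOfList_append (sn : List (String × List String)) (x : String × List String) :
    PySem.Dict.ofList (sn ++ [x]) = (PySem.Dict.ofList sn).insert x.1 x.2 := by
  simp [PySem.Dict.ofList, PySem.Dict.update, List.foldl_append]

-- characterization of A's fold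
theorem pvA_char (sn : List (String × List String)) :
    sn.foldl pvStepA PySem.Dict.empty =
      PySem.Dict.mk ((PySem.Dict.ofList sn).items.filterMap (fun p => pvEntry? p.1 p.2)) := by
  induction sn using List.reverseRecOn with
  | nil => rfl
  | append_singleton sn x ih =>
    obtain ⟨k, s⟩ := x
    rw [List.foldl_append, List.foldl_cons, List.foldl_nil, ih, pvStepA_eq, pvOfList_append]
    cases hrow : pvRowOf? k with
    | none =>
      have hent : ∀ v, pvEntry? k v = none := by intro v; simp [pvEntry?, hrow]
      rw [hent s]
      apply congrArg PySem.Dict.mk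
      rw [PySem.Dict.items_insert]
      by_cases hc : (PySem.Dict.ofList sn).contains k = true
      · rw [if_pos hc, List.filterMap_map]
        apply List.filterMap_congr
        intro p _
        by_cases hpk : p.1 = k
        · simp [Function.comp, hpk, hent]
        · simp [Function.comp, hpk]
      · rw [if_neg hc, List.filterMap_append]
        simp [hent]
    | some tb =>
      have hent : ∀ v, pvEntry? k v = some (tb.1, tb.2 ++ [pvLine v]) := by
        intro v; simp [pvEntry?, hrow]
      rw [hent s]
      apply PySem.Dict.ext
      rw [PySem.Dict.items_insert, PySem.Dict.items_insert]
      by_cases hc : (PySem.Dict.ofList sn).contains k = true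
      · -- the key (hence its title) is already present: overwrite in place on both sides
        have hk : k ∈ (PySem.Dict.ofList sn).keys := (PySem.Dict.contains_iff_mem_keys _ _).1 hc
        obtain ⟨p0, hp0, hp0k⟩ := List.mem_map.1 hk
        have hLc : (PySem.Dict.mk ((PySem.Dict.ofList sn).items.filterMap
            (fun p => pvEntry? p.1 p.2))).contains tb.1 = true := by
          rw [PySem.Dict.contains_mk]
          refine List.any_eq_true.2 ⟨(tb.1, tb.2 ++ [pvLine p0.2]), ?_, by simp⟩
          exact List.mem_filterMap.2 ⟨p0, hp0, by rw [hp0k]; exact hent p0.2⟩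
        rw [if_pos hc, if_pos hLc, List.filterMap_map, List.map_filterMap]
        apply List.filterMap_congr
        intro p _
        by_cases hpk : p.1 = k
        · simp [Function.comp, hpk, hent]
        · simp only [Function.comp]
          have : (if (p.1 == k) = true then (k, s) else p) = p := by simp [hpk]
          rw [this]
          cases hq : pvEntry? p.1 p.2 with
          | none => rfl
          | some q =>
            have hq1 : q.1 ≠ tb.1 := by
              intro hteq
              obtain ⟨tb', htb', htb'2⟩ : ∃ tb', pvRowOf? p.1 = some tb' ∧
                  q = (tb'.1, tb'.2 ++ [pvLine p.2]) := by
                unfold pvEntry? at hq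
                cases hr : pvRowOf? p.1 with
                | none => rw [hr] at hq; simp at hq
                | some tb' => rw [hr] at hq; simp at hq; exact ⟨tb', rfl, hq.symm⟩
              exact hpk (pvTitle_inj htb' hrow (by rw [← hteq, htb'2]))
            simp [hq1]
      · -- fresh key: both sides append at the end
        have hk : k ∉ (PySem.Dict.ofList sn).keys := by
          intro hm; exact hc ((PySem.Dict.contains_iff_mem_keys _ _).2 hm)
        have hLc : (PySem.Dict.mk ((PySem.Dict.ofList sn).items.filterMap
            (fun p => pvEntry? p.1 p.2))).contains tb.1 = false := by
          rw [PySem.Dict.contains_mk]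
          refine List.any_eq_false.2 ?_
          rintro q hq hbeq
          obtain ⟨p, hp, hpe⟩ := List.mem_filterMap.1 hq
          have hq1 : q.1 = tb.1 := by simpa using hbeq
          obtain ⟨tb', htb', htb'2⟩ : ∃ tb', pvRowOf? p.1 = some tb' ∧
              q = (tb'.1, tb'.2 ++ [pvLine p.2]) := by
            unfold pvEntry? at hpe
            cases hr : pvRowOf? p.1 with
            | none => rw [hr] at hpe; simp at hpe
            | some tb' => rw [hr] at hpe; simp at hpe; exact ⟨tb', rfl, hpe.symm⟩
          have : p.1 = k := pvTitle_inj htb' hrow (by rw [← hq1, htb'2])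
          exact hk (this ▸ PySem.Dict.mem_keys_of_mem_items _ hp)
        rw [if_neg hc, if_neg (by simp [hLc]), List.filterMap_append]
        simp [hent]

theorem pvIdx_spec {keys : List String} {k : String} (h : k ∈ keys) :
    ∃ i, (PySem.List.index? keys k).getD 0 = i ∧ ∃ hi : i < keys.length, keys[i] = k := by
  unfold PySem.List.index?
  cases hf : List.idxOf? k keys with
  | none => exact absurd h (List.idxOf?_eq_none_iff.1 hf)
  | some i =>
    obtain ⟨hi, hget, -⟩ := List.idxOf?_eq_some_iff.1 hf
    exact ⟨i, rfl, hi, hget⟩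

theorem pvT_pairwise (d : PySem.Dict String (List String)) :
    List.Pairwise (fun a b => a.1 < b.1) (pvT d) := by
  unfold pvT
  rw [List.pairwise_filterMap, List.pairwise_iff_getElem]
  intro i j hi hj hij b hb b' hb'
  rw [List.getElem_zipIdx] at hb hb'
  have hbi : b.1 = i := by
    cases hr : pvRowOf? (d.keys[i]'(by simpa using hi)) with
    | none => rw [hr] at hb; simp at hb
    | some tb => rw [hr] at hb; simp at hb; rw [← hb]
  have hbj : b'.1 = j := by
    cases hr : pvRowOf? (d.keys[j]'(by simpa using hj)) with
    | none => rw [hr] at hb'; simp at hb'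
    | some tb => rw [hr] at hb'; simp at hb'; rw [← hb']
  rw [hbi, hbj]; exact hij

theorem pvT_nodup (d : PySem.Dict String (List String)) : (pvT d).Nodup :=
  (pvT_pairwise d).imp (fun h he => absurd (he ▸ h) (lt_irrefl _))

theorem pvFound_eq (d : PySem.Dict String (List String)) :
    pvRowsB.foldl (fun acc r =>
      if d.contains r.1 then
        acc ++ [((PySem.List.index? d.keys r.1).getD 0, r.2.1, r.2.2 ++ [pvLine (d.getD r.1 [])])]
      else acc) ([] : List (Nat × String × List String)) =
    (pvRowsB.filter (fun r => d.contains r.1)).map (pvG d) := by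
  have := PySem.List.foldl_append_if (fun r => d.contains r.1) (pvG d) pvRowsB []
  simpa [pvG] using this

theorem pvFound_nodup (d : PySem.Dict String (List String)) :
    ((pvRowsB.filter (fun r => d.contains r.1)).map (pvG d)).Nodup := by
  apply List.Nodup.map_on _ (pvRowsB_nodup.filter _)
  intro r hr r' hr' heq
  have hrc := (List.mem_filter.1 hr).2
  have hrc' := (List.mem_filter.1 hr').2
  have hk : r.1 ∈ d.keys := (PySem.Dict.contains_iff_mem_keys _ _).1 hrc
  have hk' : r'.1 ∈ d.keys := (PySem.Dict.contains_iff_mem_keys _ _).1 hrc'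
  obtain ⟨i, hdef, hi, hget⟩ := pvIdx_spec hk
  obtain ⟨i', hdef', hi', hget'⟩ := pvIdx_spec hk'
  have hfst : i = i' := by
    have h0 := congrArg (fun e => e.1) heq
    simp only [pvG] at h0
    rw [hdef, hdef'] at h0
    exact h0
  subst hfst
  have hk1 : r.1 = r'.1 := hget.symm.trans hget' 
  exact pvRowsB_key_inj r (List.mem_filter.1 hr).1 r' (List.mem_filter.1 hr').1 hk1

theorem pvMem_found_iff_T (d : PySem.Dict String (List String)) (hnd : d.keys.Nodup)
    (x : Nat × String × List String) :
    x ∈ (pvRowsB.filter (fun r => d.contains r.1)).map (pvG d) ↔ x ∈ pvT d := by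
  constructor
  · intro hx
    obtain ⟨r, hrf, rfl⟩ := List.mem_map.1 hx
    obtain ⟨hr, hrc⟩ := List.mem_filter.1 hrf
    have hk : r.1 ∈ d.keys := (PySem.Dict.contains_iff_mem_keys _ _).1 hrc
    obtain ⟨i, hdef, hi, hget⟩ := pvIdx_spec hk
    refine List.mem_filterMap.2 ⟨(d.keys[i], i), ?_, ?_⟩
    · have : (d.keys.zipIdx)[i]'(by simpa using hi) = (d.keys[i], i) := by
        rw [List.getElem_zipIdx]; simp
      exact this ▸ List.getElem_mem _
    · rw [hget, pvRowOf?_of_mem r hr]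
      simp only [Option.map_some, Option.some.injEq, pvG]
      rw [hdef]
  · intro hx
    obtain ⟨p, hp, hpe⟩ := List.mem_filterMap.1 hx
    obtain ⟨-, hp2, hp1⟩ := List.mem_zipIdx (k := 0) hp
    cases hrow : pvRowOf? p.1 with
    | none => rw [hrow] at hpe; simp at hpe
    | some tb =>
      rw [hrow] at hpe
      simp only [Option.map_some, Option.some.injEq] at hpe
      obtain ⟨r, hr, hrk, hrv⟩ := pvRowOf?_some_exists hrow
      have hpk : p.1 ∈ d.keys := by rw [hp1]; exact List.getElem_mem _
      have hrc : d.contains r.1 = true :=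
        (PySem.Dict.contains_iff_mem_keys _ _).2 (hrk ▸ hpk)
      refine List.mem_map.2 ⟨r, List.mem_filter.2 ⟨hr, hrc⟩, ?_⟩
      obtain ⟨i, hdef, hi, hget⟩ := pvIdx_spec hpk
      have hip : i = p.2 := by
        have h1 : d.keys[i] = d.keys[p.2 - 0]'(by simpa using hp2) := by rw [hget, hp1]
        have := (hnd.getElem_inj_iff).1 h1
        simpa using this
      have hgoal : pvG d r = x := by
        simp only [pvG, hrk, hrv]
        rw [hdef, hip]
        exact hpe
      exact hgoal

theorem pvSorted_found (d : PySem.Dict String (List String)) (hnd : d.keys.Nodup) :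
    PySem.List.sorted ((pvRowsB.filter (fun r => d.contains r.1)).map (pvG d)) (fun e => e.1) =
      pvT d := by
  apply PySem.List.sorted_eq_of_perm_of_pairwise_lt
  · exact (List.perm_ext_iff_of_nodup (pvT_nodup d) (pvFound_nodup d)).2
      (fun a => (pvMem_found_iff_T d hnd a).symm)
  · exact pvT_pairwise d

theorem pvT_map (d : PySem.Dict String (List String)) :
    (pvT d).map (fun e => (e.2.1, e.2.2)) =
      d.keys.filterMap (fun k => pvEntry? k (d.getD k [])) := by
  unfold pvT
  rw [List.map_filterMap]
  have h1 : ∀ p : String × Nat,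
      (Option.map (fun tb => (p.2, tb.1, tb.2 ++ [pvLine (d.getD p.1 [])]))
        (pvRowOf? p.1)).map (fun e => (e.2.1, e.2.2)) = pvEntry? p.1 (d.getD p.1 []) := by
    intro p
    cases hr : pvRowOf? p.1 <;> simp [pvEntry?, hr]
  rw [List.filterMap_congr (fun p _ => h1 p)]
  conv_rhs => rw [← List.zipIdx_map_fst 0 d.keys]
  rw [List.filterMap_map]
  rfl

-- ===== VERDICT (by name: the statement is the Claim_ definition above) =====
theorem generate_accommodations_py_spec : Claim_equal_generate_accommodations_py := by
  intro sn _
  unfold Spec_generate_accommodations_py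
  have hnd := PySem.Dict.nodup_keys_ofList sn
  have hB : generate_accommodations_py_alt sn =
      (PySem.Dict.ofList sn).keys.filterMap
        (fun k => pvEntry? k ((PySem.Dict.ofList sn).getD k [])) := by
    simp only [generate_accommodations_py_alt]
    rw [pvFound_eq, pvSorted_found _ hnd, pvT_map]
  rw [hB]
  unfold generate_accommodations_py
  rw [pvA_char sn]
  show (PySem.Dict.ofList sn).items.filterMap (fun p => pvEntry? p.1 p.2) = _
  rw [PySem.Dict.items_eq_map_keys _ hnd ([] : List String), List.filterMap_map]
  rfl
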